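-- pv_equiv track=rewrite | github.com/blueszeng/llgame1.0 | scripts/common/Rules_ZJH.py | IsA23
-- ===== SOURCE A (Python) =====
-- def IsA23(cards):
--     #检查牌组是否存在A23的情况，因为A是多值，不做处理
--     levs = [12,1,0]
--     result1 = True
--     for lev in levs:
--         result2 = False
--         for card in cards:
--             if int((card-1)/4) == lev:
--                 result2 = True
--         if not result2:
--             return result2
--     return result1
-- ===== SOURCE B (Python) =====
-- def IsA23(cards):
--     # Single pass over the hand with three accumulator flags, combined at the end.
--     have_ace = have_two = have_three = False
--     for c in cards:
--         lev = int((c - 1) / 4)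
--         have_ace = have_ace or lev == 12
--         have_two = have_two or lev == 1
--         have_three = have_three or lev == 0
--     return have_ace and have_two and have_three
-- ===== Notes on version B (the rewrite author's own statement) =====
-- stated objective: alternative
-- what changed: B makes one single pass over the cards maintaining three boolean accumulator flags (ace/two/three seen) and conjoins them at the end, instead of A's outer loop over the three target levels each rescanning the whole hand with an early return.
import Mathlib
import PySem

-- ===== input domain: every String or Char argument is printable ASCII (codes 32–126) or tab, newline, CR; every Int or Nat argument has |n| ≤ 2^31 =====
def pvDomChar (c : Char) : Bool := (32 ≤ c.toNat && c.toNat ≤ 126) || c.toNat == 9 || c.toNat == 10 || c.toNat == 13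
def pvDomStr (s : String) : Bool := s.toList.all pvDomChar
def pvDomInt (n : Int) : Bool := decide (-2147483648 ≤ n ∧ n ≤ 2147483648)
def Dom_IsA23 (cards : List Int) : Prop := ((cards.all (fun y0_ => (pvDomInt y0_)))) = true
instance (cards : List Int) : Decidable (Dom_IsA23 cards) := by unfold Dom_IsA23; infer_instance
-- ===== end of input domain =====

-- B makes one single pass over the hand with three boolean accumulator flags,
-- instead of A's per-level rescans of the whole hand; return values are identical.

-- int((card-1)/4): float division by 4 is exact for |card| ≤ 2^31 and int() truncates
-- toward zero, so this is exactly Int.tdiv (card-1) 4 on the stated domain.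

-- ===== PORT A =====
-- inner 'for card in cards' loop, threading result2
def isA23Inner (lev : Int) : List Int → Bool → Bool
  | [], result2 => result2
  | card :: rest, result2 =>
      isA23Inner lev rest (if (card - 1).tdiv 4 == lev then true else result2)

-- outer 'for lev in levs' loop with the early 'return result2'
def isA23Outer (cards : List Int) : List Int → Bool
  | [] => true  -- result1
  | lev :: levs =>
      let result2 := isA23Inner lev cards false
      if !result2 then result2 else isA23Outer cards levs

def IsA23 (cards : List Int) : Bool := isA23Outer cards [12, 1, 0]

-- ===== PORT B =====
-- single pass threading the three flags (have_ace, have_two, have_three)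
def isA23Scan : List Int → Bool → Bool → Bool → Bool
  | [], haveAce, haveTwo, haveThree => haveAce && haveTwo && haveThree
  | c :: rest, haveAce, haveTwo, haveThree =>
      let lev := (c - 1).tdiv 4
      isA23Scan rest (haveAce || lev == 12) (haveTwo || lev == 1) (haveThree || lev == 0)

def IsA23_alt (cards : List Int) : Bool := isA23Scan cards false false false

-- ===== PRECONDITION & SPEC =====
def Spec_IsA23 (cards : List Int) (out : Bool) : Prop := out = IsA23_alt cards
instance (cards : List Int) (out : Bool) : Decidable (Spec_IsA23 cards out) := by unfold Spec_IsA23; infer_instance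

-- ===== CLAIM (what is proved, stated in full; the proofs are below) =====
def Claim_equal_IsA23 : Prop := ∀ (cards : List Int), Dom_IsA23 cards → Spec_IsA23 cards (IsA23 cards)

-- ===== LEMMAS AND PROOFS =====

lemma isA23Inner_eq (lev : Int) (cs : List Int) (r2 : Bool) :
    isA23Inner lev cs r2 = (r2 || cs.any fun c => (c - 1).tdiv 4 == lev) := by
  induction cs generalizing r2 with
  | nil => simp [isA23Inner]
  | cons c rest ih =>
      simp only [isA23Inner, ih, List.any_cons]
      by_cases h : ((c - 1).tdiv 4 == lev) = true <;> simp [h]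

lemma isA23Scan_eq (cs : List Int) (a b c : Bool) :
    isA23Scan cs a b c =
      ((a || cs.any fun x => (x - 1).tdiv 4 == 12) &&
       (b || cs.any fun x => (x - 1).tdiv 4 == 1) &&
       (c || cs.any fun x => (x - 1).tdiv 4 == 0)) := by
  induction cs generalizing a b c with
  | nil => simp [isA23Scan]
  | cons x rest ih =>
      simp only [isA23Scan, ih, List.any_cons]
      ac_rfl

-- ===== VERDICT (by name: the statement is the Claim_ definition above) =====
theorem IsA23_spec : Claim_equal_IsA23 := by
  intro cards _
  unfold Spec_IsA23
  simp only [IsA23, IsA23_alt, isA23Outer, isA23Scan_eq, isA23Inner_eq, Bool.false_or]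
  cases h12 : (cards.any fun x => (x - 1).tdiv 4 == 12) <;>
    cases h1 : (cards.any fun x => (x - 1).tdiv 4 == 1) <;>
      cases h0 : (cards.any fun x => (x - 1).tdiv 4 == 0) <;>
        simp [h12, h1, h0]
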